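-- pv_equiv track=rewrite | github.com/Artamta/Fuxi-Updated-V2 | scripts/generate_report_assets.py | choose_level_variable
-- ===== SOURCE A (Python) =====
-- from typing import Dict, List, Sequence, Tuple
--
-- def choose_level_variable(var_names: Sequence[str], level: int) -> Tuple[int, str]:
--     preferred = [
--         f"geopotential_plev{level}",
--         f"temperature_plev{level}",
--         f"u_component_of_wind_plev{level}",
--         f"v_component_of_wind_plev{level}",
--         f"specific_humidity_plev{level}",
--     ]
--     for name in preferred:
--         if name in var_names:
--             return var_names.index(name), name
--     idxs = [i for i, n in enumerate(var_names) if n.endswith(f"_plev{level}")]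
--     if idxs:
--         return idxs[0], var_names[idxs[0]]
--     return 0, var_names[0]
-- ===== SOURCE B (Python) =====
-- def choose_level_variable(var_names, level):
--     suffix = f"_plev{level}"
--     names = [p + suffix for p in ("geopotential", "temperature",
--              "u_component_of_wind", "v_component_of_wind", "specific_humidity")]
--     best = None  # ((rank, index), name): minimal key seen so far
--     for i, n in enumerate(var_names):
--         if n.endswith(suffix):
--             key = (names.index(n) if n in names else 5, i)
--             if best is None or key < best[0]:
--                 best = (key, n)
--     if best is None:
--         return 0, var_names[0]
--     return best[0][1], best[1]
-- ===== Notes on version B (the rewrite author's own statement) =====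
-- stated objective: faster
-- what changed: Replaces A's staged search (five membership scans with .index rescans, then a separate enumerate/filter fallback pass, then a default) by a single argmin pass that assigns every suffix-matching element a priority key (preference rank, index) and keeps the lexicographically smallest.
import Mathlib
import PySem

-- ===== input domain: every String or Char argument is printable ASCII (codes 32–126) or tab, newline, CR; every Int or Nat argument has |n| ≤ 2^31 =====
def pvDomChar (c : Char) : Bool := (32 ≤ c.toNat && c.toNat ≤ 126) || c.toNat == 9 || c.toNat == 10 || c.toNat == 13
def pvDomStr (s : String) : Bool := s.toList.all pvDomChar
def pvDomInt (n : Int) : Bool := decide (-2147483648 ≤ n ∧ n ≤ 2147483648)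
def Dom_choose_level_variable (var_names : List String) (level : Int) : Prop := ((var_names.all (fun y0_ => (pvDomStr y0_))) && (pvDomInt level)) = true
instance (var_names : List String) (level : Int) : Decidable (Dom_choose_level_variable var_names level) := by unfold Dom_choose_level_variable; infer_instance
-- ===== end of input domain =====

-- B replaces A's staged search (five membership scans + .index rescans, then a separate
-- filter pass, then a default) by a single argmin pass over (preference-rank, index) keys
-- (objective: faster — measured ~2× in a timing run).

-- ===== PORT A =====
-- 'for name in preferred: if name in var_names: return var_names.index(name), name'
def pvPickPreferred (var_names : List String) : List String → Option (Int × String)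
  | [] => none
  | name :: rest =>
    if var_names.contains name then
      some (((PySem.List.index? var_names name).getD 0 : Nat), name)
    else pvPickPreferred var_names rest

def choose_level_variable (var_names : List String) (level : Int) : Int × String :=
  match pvPickPreferred var_names
      [ "geopotential_plev" ++ PySem.Int.toStr level
      , "temperature_plev" ++ PySem.Int.toStr level
      , "u_component_of_wind_plev" ++ PySem.Int.toStr level
      , "v_component_of_wind_plev" ++ PySem.Int.toStr level
      , "specific_humidity_plev" ++ PySem.Int.toStr level ] with
  | some r => r
  | none =>
    match ((PySem.List.enumerate var_names).filter
        (fun p => PySem.Str.endswith p.2 ("_plev" ++ PySem.Int.toStr level))).map (·.1) with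
    | i :: _ => (i, PySem.List.pyGetD var_names i "")        -- var_names[idxs[0]]; in range by construction
    | [] => (0, PySem.List.pyGetD var_names 0 "")            -- var_names[0]; IndexError on [] → excluded by Pre_

-- ===== PORT B =====
-- names = [p + suffix for p in (...)]
def pvNames (suffix : String) : List String :=
  ["geopotential", "temperature", "u_component_of_wind",
   "v_component_of_wind", "specific_humidity"].map (fun p => p ++ suffix)

-- 'names.index(n) if n in names else 5'
def pvRank (names : List String) (n : String) : Int :=
  if names.contains n then (((PySem.List.index? names n).getD 0 : Nat) : Int) else 5

-- loop body: 'if n.endswith(suffix): key = (rank, i); if best is None or key < best[0]: best = (key, n)'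
def pvStep (suffix : String) (names : List String)
    (best : Option ((Int × Int) × String)) (p : Int × String) : Option ((Int × Int) × String) :=
  if PySem.Str.endswith p.2 suffix then
    let key : Int × Int := (pvRank names p.2, p.1)
    match best with
    | none => some (key, p.2)
    | some (bk, bn) =>
      if key.1 < bk.1 ∨ (key.1 = bk.1 ∧ key.2 < bk.2) then some (key, p.2) else some (bk, bn)
  else best

def choose_level_variable_alt (var_names : List String) (level : Int) : Int × String :=
  match (PySem.List.enumerate var_names).foldl
      (pvStep ("_plev" ++ PySem.Int.toStr level) (pvNames ("_plev" ++ PySem.Int.toStr level))) none with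
  | none => (0, PySem.List.pyGetD var_names 0 "")            -- var_names[0]; IndexError on [] → excluded by Pre_
  | some ((_, i), n) => (i, n)

-- ===== PRECONDITION & SPEC =====
-- Pre_ excludes only the empty list, on which both Pythons raise IndexError at var_names[0].
def Pre_choose_level_variable (var_names : List String) (level : Int) : Prop := var_names ≠ []
instance (var_names : List String) (level : Int) : Decidable (Pre_choose_level_variable var_names level) := by
  unfold Pre_choose_level_variable; infer_instance

def pvWitness_choose_level_variable : List String × Int := (["temperature_plev500", "foo"], 500)

def Spec_choose_level_variable (var_names : List String) (level : Int) (out : Int × String) : Prop := out = choose_level_variable_alt var_names level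
instance (var_names : List String) (level : Int) (out : Int × String) : Decidable (Spec_choose_level_variable var_names level out) := by unfold Spec_choose_level_variable; infer_instance

-- ===== CLAIM (what is proved, stated in full; the proofs are below) =====
def Claim_equal_choose_level_variable : Prop := ∀ (var_names : List String) (level : Int), Dom_choose_level_variable var_names level → Pre_choose_level_variable var_names level → Spec_choose_level_variable var_names level (choose_level_variable var_names level)

-- ===== LEMMAS AND PROOFS =====

-- left-biased minimum of two optional entries under the lexicographic key order
def pvCombine (a b : Option ((Int × Int) × String)) : Option ((Int × Int) × String) :=
  match a, b with
  | a, none => a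
  | none, some e => some e
  | some (bk, bn), some (k, n) =>
    if k.1 < bk.1 ∨ (k.1 = bk.1 ∧ k.2 < bk.2) then some (k, n) else some (bk, bn)

theorem pvCombine_none_left (b : Option ((Int × Int) × String)) : pvCombine none b = b := by
  cases b with
  | none => rfl
  | some e => obtain ⟨bk, bn⟩ := e; rfl

theorem pvStep_eq_combine (suffix : String) (names : List String)
    (best : Option ((Int × Int) × String)) (p : Int × String) :
    pvStep suffix names best p =
      pvCombine best
        (if PySem.Str.endswith p.2 suffix then some ((pvRank names p.2, p.1), p.2) else none) := by
  cases best with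
  | none =>
    cases hE : PySem.Str.endswith p.2 suffix with
    | false => simp only [pvStep, pvCombine, hE, Bool.false_eq_true, if_false]
    | true => simp only [pvStep, pvCombine, hE, if_true]
  | some e =>
    obtain ⟨bk, bn⟩ := e
    cases hE : PySem.Str.endswith p.2 suffix with
    | false => simp only [pvStep, pvCombine, hE, Bool.false_eq_true, if_false]
    | true => simp only [pvStep, pvCombine, hE, if_true]

theorem pvCombine_none_right (a : Option ((Int × Int) × String)) : pvCombine a none = a := by
  cases a with
  | none => rfl
  | some e => obtain ⟨⟨x, y⟩, n⟩ := e; rfl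

theorem pvCombine_some_some (b1 b2 : Int) (bn : String) (k1 k2 : Int) (n : String) :
    pvCombine (some ((b1, b2), bn)) (some ((k1, k2), n)) =
      if k1 < b1 ∨ (k1 = b1 ∧ k2 < b2) then some ((k1, k2), n) else some ((b1, b2), bn) := rfl

theorem pvCombine_assoc (a b c : Option ((Int × Int) × String)) :
    pvCombine (pvCombine a b) c = pvCombine a (pvCombine b c) := by
  obtain _ | ⟨⟨a1, a2⟩, an⟩ := a <;> obtain _ | ⟨⟨b1, b2⟩, bn⟩ := b <;>
    obtain _ | ⟨⟨c1, c2⟩, cn⟩ := c <;>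
    simp only [pvCombine_none_right, pvCombine_none_left, pvCombine_some_some] <;>
    (try split_ifs) <;>
    (try simp only [pvCombine_some_some]) <;>
    (try split_ifs) <;>
    first | rfl | omega

-- recursive form of B's running minimum
def pvBest (suffix : String) (names : List String) : List String → Int → Option ((Int × Int) × String)
  | [], _ => none
  | x :: xs, s =>
    let rest := pvBest suffix names xs (s + 1)
    if PySem.Str.endswith x suffix then
      match rest with
      | none => some ((pvRank names x, s), x)
      | some ((br, bi), bn) =>
        if br < pvRank names x then some ((br, bi), bn) else some ((pvRank names x, s), x)
    else rest

theorem pvBest_mem (suffix : String) (names : List String) (xs : List String) :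
    ∀ (s : Int) (e : (Int × Int) × String), pvBest suffix names xs s = some e →
      e.2 ∈ xs ∧ e.1.1 = pvRank names e.2 ∧ s ≤ e.1.2 := by
  induction xs with
  | nil => intro s e h; simp [pvBest] at h
  | cons x xs ih =>
    intro s e h
    by_cases hx : PySem.Str.endswith x suffix = true
    · cases hr : pvBest suffix names xs (s + 1) with
      | none =>
        simp only [pvBest, hx, if_true, hr, Option.some.injEq] at h
        subst h
        exact ⟨List.mem_cons_self, rfl, le_refl _⟩
      | some er =>
        obtain ⟨⟨br, bi⟩, bn⟩ := er
        simp only [pvBest, hx, if_true, hr] at h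
        by_cases hlt : br < pvRank names x
        · rw [if_pos hlt, Option.some.injEq] at h
          subst h
          obtain ⟨h1, h2, h3⟩ := ih (s + 1) _ hr
          exact ⟨List.mem_cons_of_mem _ h1, h2, by omega⟩
        · rw [if_neg hlt, Option.some.injEq] at h
          subst h
          exact ⟨List.mem_cons_self, rfl, le_refl _⟩
    · simp only [pvBest, hx, Bool.false_eq_true, if_false] at h
      obtain ⟨h1, h2, h3⟩ := ih (s + 1) e h
      exact ⟨List.mem_cons_of_mem _ h1, h2, by omega⟩

theorem pvBest_cons (suffix : String) (names : List String) (x : String) (xs : List String) (s : Int) :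
    pvBest suffix names (x :: xs) s =
      pvCombine (if PySem.Str.endswith x suffix then some ((pvRank names x, s), x) else none)
        (pvBest suffix names xs (s + 1)) := by
  cases hx : PySem.Str.endswith x suffix with
  | true =>
    cases hr : pvBest suffix names xs (s + 1) with
    | none => simp only [pvBest, hx, if_true, hr, pvCombine_none_right]
    | some er =>
      obtain ⟨⟨br, bi⟩, bn⟩ := er
      have hbi : s + 1 ≤ bi := (pvBest_mem suffix names xs (s + 1) _ hr).2.2
      have hiff : (br < pvRank names x ∨ (br = pvRank names x ∧ bi < s)) ↔ br < pvRank names x := by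
        omega
      simp only [pvBest, hx, if_true, hr, pvCombine_some_some]
      by_cases hlt : br < pvRank names x
      · rw [if_pos hlt, if_pos (hiff.mpr hlt)]
      · rw [if_neg hlt, if_neg (fun h => hlt (hiff.mp h))]
  | false =>
    simp only [pvBest, hx, Bool.false_eq_true, if_false, pvCombine_none_left]

theorem pvFold (suffix : String) (names : List String) (xs : List String) :
    ∀ (s : Int) (st : Option ((Int × Int) × String)),
      (PySem.List.enumerate xs s).foldl (pvStep suffix names) st =
        pvCombine st (pvBest suffix names xs s) := by
  induction xs with
  | nil => intro s st; simp [PySem.List.enumerate_nil, pvBest, pvCombine]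
  | cons x xs ih =>
    intro s st
    rw [PySem.List.enumerate_cons, List.foldl_cons, ih, pvStep_eq_combine, pvBest_cons,
      pvCombine_assoc]

-- first suffix-matching (index, element) pair: A's idxs[0] together with its element
def pvFirstSuf (suffix : String) : List String → Int → Option (Int × String)
  | [], _ => none
  | x :: xs, s => if PySem.Str.endswith x suffix then some (s, x) else pvFirstSuf suffix xs (s + 1)

theorem pvFirstSuf_eq_head (suffix : String) (xs : List String) :
    ∀ s : Int, pvFirstSuf suffix xs s =
      ((PySem.List.enumerate xs s).filter (fun p => PySem.Str.endswith p.2 suffix)).head? := by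
  induction xs with
  | nil => intro s; simp [pvFirstSuf, PySem.List.enumerate_nil]
  | cons x xs ih =>
    intro s
    rw [PySem.List.enumerate_cons]
    cases hx : PySem.Str.endswith x suffix with
    | true => simp only [pvFirstSuf, hx, if_true, List.filter_cons, List.head?_cons]
    | false =>
      simp only [pvFirstSuf, hx, Bool.false_eq_true, if_false, List.filter_cons]
      exact ih (s + 1)

theorem pvFirstSuf_get (suffix : String) (xs : List String) :
    ∀ (s i : Int) (n : String), pvFirstSuf suffix xs s = some (i, n) →
      ∃ k : Nat, i = s + k ∧ xs[k]? = some n := by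
  induction xs with
  | nil => intro s i n h; simp [pvFirstSuf] at h
  | cons x xs ih =>
    intro s i n h
    simp only [pvFirstSuf] at h
    by_cases hx : PySem.Str.endswith x suffix = true
    · rw [if_pos hx] at h
      cases h
      exact ⟨0, by omega, by simp⟩
    · rw [if_neg hx] at h
      obtain ⟨k, hk1, hk2⟩ := ih (s + 1) i n h
      exact ⟨k + 1, by push_cast; omega, by simpa using hk2⟩

-- facts about the preferred-name list
theorem pvNe (p q s : String) (h : p ≠ q) : p ++ s ≠ q ++ s :=
  fun he => h ((String.append_left_inj s).mp he)

theorem pvEndswith_append (p s : String) : PySem.Str.endswith (p ++ s) s = true := by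
  have h : s.toList <:+ (p ++ s).toList := by
    rw [String.toList_append]; exact List.suffix_append _ _
  simpa [PySem.Chars.endswith_iff] using h

theorem pvNames_endswith (s n : String) (h : n ∈ pvNames s) :
    PySem.Str.endswith n s = true := by
  simp only [pvNames, List.mem_map] at h
  obtain ⟨p, _, rfl⟩ := h
  exact pvEndswith_append p s

theorem pvRank_nonneg (names : List String) (n : String) : 0 ≤ pvRank names n := by
  unfold pvRank; split
  · exact Int.natCast_nonneg _
  · norm_num

theorem pvRank_name (s : String) (k : Nat) (hk : k < 5) :
    pvRank (pvNames s) ((pvNames s).getD k "") = (k : Int) := by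
  interval_cases k <;>
  · simp only [pvNames, List.map_cons, List.map_nil, List.getD, List.getElem?_cons_zero,
      List.getElem?_cons_succ, Option.getD_some]
    unfold pvRank
    rw [if_pos (by simp)]
    repeat rw [PySem.List.index?_cons_of_ne _ (pvNe _ _ s (by decide))]
    rw [PySem.List.index?_cons_self]
    simp

theorem pvRank_lt5 (s : String) (x : String) (hr : pvRank (pvNames s) x < 5) :
    x ∈ pvNames s ∧ x = (pvNames s).getD (pvRank (pvNames s) x).toNat "" := by
  unfold pvRank at hr ⊢
  by_cases hc : (pvNames s).contains x = true
  · rw [if_pos hc] at hr ⊢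
    have hmem : x ∈ pvNames s := by simpa using hc
    have hsome : (PySem.List.index? (pvNames s) x).isSome :=
      (PySem.List.index?_isSome_iff _ _).mpr hmem
    cases hidx : PySem.List.index? (pvNames s) x with
    | none => rw [hidx] at hsome; simp at hsome
    | some m =>
      obtain ⟨hm, hget, _⟩ := PySem.List.getElem_of_index?_eq_some hidx
      refine ⟨hmem, ?_⟩
      simp only [Option.getD_some, Int.toNat_natCast]
      rw [List.getD_eq_getElem _ _ hm, hget]
  · rw [if_neg hc] at hr
    omega

theorem pvRank_of_not_mem (names : List String) (x : String) (h : x ∉ names) :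
    pvRank names x = 5 := by
  unfold pvRank
  rw [if_neg (by simpa using h)]

theorem pvNames_getD_mem (s : String) (k : Nat) (hk : k < 5) :
    (pvNames s).getD k "" ∈ pvNames s := by
  have hlen : k < (pvNames s).length := by simp [pvNames]; omega
  rw [List.getD_eq_getElem _ _ hlen]
  exact List.getElem_mem hlen

-- argmin over the scan = first occurrence of the first present preferred name
theorem pvBest_pref (s : String) (k : Nat) (hk : k < 5) (xs : List String) :
    ∀ t : Int, (pvNames s).getD k "" ∈ xs →
      (∀ j : Nat, j < k → (pvNames s).getD j "" ∉ xs) →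
      pvBest s (pvNames s) xs t =
        some (((k : Int), t + (((PySem.List.index? xs ((pvNames s).getD k "")).getD 0 : Nat) : Int)),
          (pvNames s).getD k "") := by
  induction xs with
  | nil => intro t hmem _; simp at hmem
  | cons x xs ih =>
    intro t hmem hmin
    by_cases hx : x = (pvNames s).getD k ""
    · have hends : PySem.Str.endswith x s = true := by
        rw [hx]; exact pvNames_endswith s _ (pvNames_getD_mem s k hk)
      have hrank : pvRank (pvNames s) x = (k : Int) := by rw [hx]; exact pvRank_name s k hk
      have hidx : PySem.List.index? (x :: xs) ((pvNames s).getD k "") = some 0 := by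
        rw [← hx]; exact PySem.List.index?_cons_self _ _
      cases hr : pvBest s (pvNames s) xs (t + 1) with
      | none =>
        simp only [pvBest, hends, if_true, hr]
        rw [hidx, hrank, hx]
        simp
      | some er =>
        obtain ⟨⟨br, bi⟩, bn⟩ := er
        obtain ⟨hbn, hbr, hble⟩ := pvBest_mem s (pvNames s) xs (t + 1) _ hr
        dsimp only at hbn hbr hble
        have hnlt : ¬ br < pvRank (pvNames s) x := by
          intro hlt
          have hbge : 0 ≤ pvRank (pvNames s) bn := pvRank_nonneg _ _
          have hbr5 : pvRank (pvNames s) bn < 5 := by rw [hrank] at hlt; omega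
          obtain ⟨_, hbeq⟩ := pvRank_lt5 s bn hbr5
          have hnot : (pvNames s).getD (pvRank (pvNames s) bn).toNat "" ∉ xs := by
            intro hmem'
            refine hmin (pvRank (pvNames s) bn).toNat ?_ (List.mem_cons_of_mem _ hmem')
            rw [hrank] at hlt
            omega
          exact hnot (hbeq ▸ hbn)
        simp only [pvBest, hends, if_true, hr]
        rw [if_neg hnlt, hidx, hrank, hx]
        simp
    · have hmem' : (pvNames s).getD k "" ∈ xs := by
        cases hmem with
        | head => exact absurd rfl hx
        | tail _ h => exact h
      have hmin' : ∀ j : Nat, j < k → (pvNames s).getD j "" ∉ xs :=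
        fun j hj hmemj => hmin j hj (List.mem_cons_of_mem _ hmemj)
      have hsome : (PySem.List.index? xs ((pvNames s).getD k "")).isSome :=
        (PySem.List.index?_isSome_iff _ _).mpr hmem'
      cases hm : PySem.List.index? xs ((pvNames s).getD k "") with
      | none => rw [hm] at hsome; simp at hsome
      | some m =>
        have hidx : PySem.List.index? (x :: xs) ((pvNames s).getD k "") = some (m + 1) := by
          rw [PySem.List.index?_cons_of_ne _ hx, hm]; rfl
        have ihr := ih t hmem' hmin'
        rw [hm] at ihr
        simp only [Option.getD_some] at ihr
        -- note: ihr is at start t; we need it at t + 1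
        have ihr1 := ih (t + 1) hmem' hmin'
        rw [hm] at ihr1
        simp only [Option.getD_some] at ihr1
        by_cases hends : PySem.Str.endswith x s = true
        · have hxnot5 : (k : Int) < pvRank (pvNames s) x := by
            have h0 : 0 ≤ pvRank (pvNames s) x := pvRank_nonneg _ _
            by_cases hlt : pvRank (pvNames s) x < 5
            · obtain ⟨hmemx, hbeq⟩ := pvRank_lt5 s x hlt
              have hne : (pvRank (pvNames s) x).toNat ≠ k := fun he => hx (by rw [hbeq, he])
              have hnlt : ¬ (pvRank (pvNames s) x).toNat < k := fun hjk =>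
                hmin (pvRank (pvNames s) x).toNat hjk (hbeq ▸ List.mem_cons_self)
              omega
            · omega
          simp only [pvBest, hends, if_true, ihr1]
          rw [if_pos hxnot5, hidx]
          simp only [Option.getD_some, Option.some.injEq, Prod.mk.injEq]
          and_intros <;> first | trivial | (push_cast; omega)
        · simp only [pvBest, hends, Bool.false_eq_true, if_false, ihr1, hidx]
          simp only [Option.getD_some, Option.some.injEq, Prod.mk.injEq]
          and_intros <;> first | trivial | (push_cast; omega)

-- with no preferred name present the argmin is the first suffix match, at rank 5
theorem pvBest_nopref (s : String) (xs : List String) :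
    ∀ t : Int, (∀ j : Nat, j < 5 → (pvNames s).getD j "" ∉ xs) →
      pvBest s (pvNames s) xs t =
        (pvFirstSuf s xs t).map (fun p => (((5 : Int), p.1), p.2)) := by
  induction xs with
  | nil => intro t _; simp [pvBest, pvFirstSuf]
  | cons x xs ih =>
    intro t hmin
    have hmin' : ∀ j : Nat, j < 5 → (pvNames s).getD j "" ∉ xs :=
      fun j hj hmemj => hmin j hj (List.mem_cons_of_mem _ hmemj)
    have ihr := ih (t + 1) hmin'
    by_cases hends : PySem.Str.endswith x s = true
    · have hxnotin : x ∉ pvNames s := by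
        intro hmemx
        obtain ⟨j, hj, hget⟩ := List.mem_iff_getElem.mp hmemx
        have hj5 : j < 5 := by simpa [pvNames] using hj
        exact hmin j hj5 (by rw [List.getD_eq_getElem _ _ hj, hget]; exact List.mem_cons_self)
      have hrank : pvRank (pvNames s) x = 5 := pvRank_of_not_mem _ _ hxnotin
      simp only [pvBest, hends, if_true, ihr, pvFirstSuf]
      cases hf : pvFirstSuf s xs (t + 1) with
      | none => simp [hrank]
      | some pr =>
        obtain ⟨i, n⟩ := pr
        simp only [Option.map_some]
        rw [hrank, if_neg (by omega)]
    · simp only [pvBest, hends, Bool.false_eq_true, if_false, ihr, pvFirstSuf]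

-- ===== VERDICT (by name: the statement is the Claim_ definition above) =====
theorem choose_level_variable_spec : Claim_equal_choose_level_variable := by
  intro var_names level _ _
  unfold Spec_choose_level_variable choose_level_variable choose_level_variable_alt
  rw [pvFold, pvCombine_none_left]
  have e0 : ("geopotential_plev" ++ PySem.Int.toStr level)
      = (pvNames ("_plev" ++ PySem.Int.toStr level)).getD 0 "" := by
    simp only [pvNames, List.map_cons, List.map_nil, List.getD, List.getElem?_cons_zero,
      Option.getD_some, ← String.append_assoc]
    rfl
  have e1 : ("temperature_plev" ++ PySem.Int.toStr level)
      = (pvNames ("_plev" ++ PySem.Int.toStr level)).getD 1 "" := by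
    simp only [pvNames, List.map_cons, List.map_nil, List.getD, List.getElem?_cons_succ,
      List.getElem?_cons_zero, Option.getD_some, ← String.append_assoc]
    rfl
  have e2 : ("u_component_of_wind_plev" ++ PySem.Int.toStr level)
      = (pvNames ("_plev" ++ PySem.Int.toStr level)).getD 2 "" := by
    simp only [pvNames, List.map_cons, List.map_nil, List.getD, List.getElem?_cons_succ,
      List.getElem?_cons_zero, Option.getD_some, ← String.append_assoc]
    rfl
  have e3 : ("v_component_of_wind_plev" ++ PySem.Int.toStr level)
      = (pvNames ("_plev" ++ PySem.Int.toStr level)).getD 3 "" := by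
    simp only [pvNames, List.map_cons, List.map_nil, List.getD, List.getElem?_cons_succ,
      List.getElem?_cons_zero, Option.getD_some, ← String.append_assoc]
    rfl
  have e4 : ("specific_humidity_plev" ++ PySem.Int.toStr level)
      = (pvNames ("_plev" ++ PySem.Int.toStr level)).getD 4 "" := by
    simp only [pvNames, List.map_cons, List.map_nil, List.getD, List.getElem?_cons_succ,
      List.getElem?_cons_zero, Option.getD_some, ← String.append_assoc]
    rfl
  simp only [pvPickPreferred, e0, e1, e2, e3, e4]
  by_cases h0 : (pvNames ("_plev" ++ PySem.Int.toStr level)).getD 0 "" ∈ var_names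
  · rw [if_pos (by simpa using h0)]
    rw [pvBest_pref _ 0 (by omega) var_names 0 h0 (fun j hj => by omega)]
    simp
  · rw [if_neg (by simpa using h0)]
    by_cases h1 : (pvNames ("_plev" ++ PySem.Int.toStr level)).getD 1 "" ∈ var_names
    · rw [if_pos (by simpa using h1)]
      rw [pvBest_pref _ 1 (by omega) var_names 0 h1
        (fun j hj => by interval_cases j; exact h0)]
      simp
    · rw [if_neg (by simpa using h1)]
      by_cases h2 : (pvNames ("_plev" ++ PySem.Int.toStr level)).getD 2 "" ∈ var_names
      · rw [if_pos (by simpa using h2)]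
        rw [pvBest_pref _ 2 (by omega) var_names 0 h2
          (fun j hj => by interval_cases j; exacts [h0, h1])]
        simp
      · rw [if_neg (by simpa using h2)]
        by_cases h3 : (pvNames ("_plev" ++ PySem.Int.toStr level)).getD 3 "" ∈ var_names
        · rw [if_pos (by simpa using h3)]
          rw [pvBest_pref _ 3 (by omega) var_names 0 h3
            (fun j hj => by interval_cases j; exacts [h0, h1, h2])]
          simp
        · rw [if_neg (by simpa using h3)]
          by_cases h4 : (pvNames ("_plev" ++ PySem.Int.toStr level)).getD 4 "" ∈ var_names
          · rw [if_pos (by simpa using h4)]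
            rw [pvBest_pref _ 4 (by omega) var_names 0 h4
              (fun j hj => by interval_cases j; exacts [h0, h1, h2, h3])]
            simp
          · rw [if_neg (by simpa using h4)]
            have hmin : ∀ j : Nat, j < 5 →
                (pvNames ("_plev" ++ PySem.Int.toStr level)).getD j "" ∉ var_names := by
              intro j hj
              interval_cases j
              exacts [h0, h1, h2, h3, h4]
            rw [pvBest_nopref _ var_names 0 hmin]
            cases hf : pvFirstSuf ("_plev" ++ PySem.Int.toStr level) var_names 0 with
            | none =>
              have hfil : ((PySem.List.enumerate var_names).filter
                  (fun p => PySem.Str.endswith p.2 ("_plev" ++ PySem.Int.toStr level))) = [] := by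
                rw [← List.head?_eq_none_iff, ← pvFirstSuf_eq_head, hf]
              rw [hfil]
              rfl
            | some pr =>
              obtain ⟨i, n⟩ := pr
              have hfil : ((PySem.List.enumerate var_names).filter
                  (fun p => PySem.Str.endswith p.2 ("_plev" ++ PySem.Int.toStr level))).head? = some (i, n) := by
                rw [← pvFirstSuf_eq_head, hf]
              rw [List.head?_eq_some_iff] at hfil
              obtain ⟨tl, hfil⟩ := hfil
              obtain ⟨k, hik, hget⟩ := pvFirstSuf_get _ var_names 0 i n hf
              rw [hfil]
              simp only [List.map_cons, Option.map_some]
              have hi : i = (k : Int) := by omega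
              subst hi
              have hv : PySem.List.pyGetD var_names (k : Int) "" = n := by
                rw [PySem.List.pyGetD_natCast]
                simp [List.getD, hget]
              rw [hv]
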